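-- pv_equiv track=rewrite | github.com/rhdani/leetcode-75 | advancedTopics/additionWoPlus.py | integer_addition
-- ===== SOURCE A (Python) =====
-- def integer_addition(a, b):
--     MASK = 0xFFFFFFFF        # 32 bits of 1s
--     MAX_INT = 0x7FFFFFFF     # max positive 32-bit int
--
--     while b != 0:
--         carry = (a & b) & MASK
--         a = (a ^ b) & MASK
--         b = (carry << 1) & MASK
--
--     # convert to signed integer
--     return a if a <= MAX_INT else ~(a ^ MASK)
-- ===== SOURCE B (Python) =====
-- def integer_addition(a, b):
--     MASK = 0xFFFFFFFF        # 32 bits of 1s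
--     MAX_INT = 0x7FFFFFFF     # max positive 32-bit int
--     s = (a + b) & MASK
--     return s if s <= MAX_INT else ~(s ^ MASK)
-- ===== Notes on version B (the rewrite author's own statement) =====
-- stated objective: simpler
-- what changed: Replaces the iterative carry-propagation loop (xor/and/shift until no carry) with a closed-form computation: the low 32 bits of a+b taken directly, followed by the same signed conversion.
import Mathlib
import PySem

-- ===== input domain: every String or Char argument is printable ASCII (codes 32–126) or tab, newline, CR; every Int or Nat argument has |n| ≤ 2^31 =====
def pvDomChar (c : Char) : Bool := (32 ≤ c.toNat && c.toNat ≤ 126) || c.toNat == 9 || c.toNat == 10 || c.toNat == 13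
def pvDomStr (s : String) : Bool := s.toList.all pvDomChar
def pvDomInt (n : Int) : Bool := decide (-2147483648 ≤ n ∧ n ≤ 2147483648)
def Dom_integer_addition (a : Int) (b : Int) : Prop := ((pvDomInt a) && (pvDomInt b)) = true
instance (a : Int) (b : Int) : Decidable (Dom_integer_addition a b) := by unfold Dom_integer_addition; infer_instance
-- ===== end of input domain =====

-- B replaces A's iterative carry-propagation loop by the closed-form low-32-bit sum (a+b)&MASK
-- followed by the same signed conversion (objective: simpler).


-- ===== PORT A =====
-- Python's unbounded 'while b != 0' is run with fuel 64; the proofs below show the loop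
-- reaches b = 0 well within that fuel on every input, so the fuel guard is never hit.
def integer_addition_loop : Nat → Int → Int → Int
  | 0, a, _ => a
  | fuel+1, a, b =>
    if b ≠ 0 then
      let carry := PySem.Int.band (PySem.Int.band a b) 4294967295
      let a' := PySem.Int.band (PySem.Int.bxor a b) 4294967295
      let b' := PySem.Int.band (carry <<< (1:Nat)) 4294967295
      integer_addition_loop fuel a' b'
    else a

def integer_addition (a : Int) (b : Int) : Int :=
  let r := integer_addition_loop 64 a b
  if r ≤ 2147483647 then r else Int.not (PySem.Int.bxor r 4294967295)

-- ===== PORT B =====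
def integer_addition_alt (a : Int) (b : Int) : Int :=
  let s := PySem.Int.band (a + b) 4294967295
  if s ≤ 2147483647 then s else Int.not (PySem.Int.bxor s 4294967295)

-- ===== PRECONDITION & SPEC =====
def Spec_integer_addition (a : Int) (b : Int) (out : Int) : Prop := out = integer_addition_alt a b
instance (a : Int) (b : Int) (out : Int) : Decidable (Spec_integer_addition a b out) := by unfold Spec_integer_addition; infer_instance

-- ===== CLAIM (what is proved, stated in full; the proofs are below) =====
def Claim_equal_integer_addition : Prop := ∀ (a : Int) (b : Int), Dom_integer_addition a b → Spec_integer_addition a b (integer_addition a b)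

-- ===== LEMMAS AND PROOFS =====

-- a + b splits into xor (bitwise sum without carries) plus twice the carries
theorem nat_add_xor_and (a : Nat) : ∀ b : Nat, a + b = (a ^^^ b) + 2 * (a &&& b) := by
  induction a using Nat.binaryRec with
  | zero => intro b; simp
  | bit α a' ih =>
    intro b
    induction b using Nat.bitCasesOn with
    | _ β b' =>
      rw [Nat.xor_bit, Nat.land_bit, Nat.bit_val, Nat.bit_val, Nat.bit_val, Nat.bit_val]
      have := ih b'
      cases α <;> cases β <;> simp [Bool.toNat] <;> omega

theorem nat_or_decomp (m n : Nat) : m ||| n = (m ^^^ n) + (m &&& n) := by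
  have h1 : (m ^^^ n) &&& (m &&& n) = 0 := by
    apply Nat.eq_of_testBit_eq; intro i
    simp only [Nat.testBit_and, Nat.testBit_xor, Nat.zero_testBit]
    cases m.testBit i <;> cases n.testBit i <;> rfl
  have h2 : (m ^^^ n) ^^^ (m &&& n) = m ||| n := by
    apply Nat.eq_of_testBit_eq; intro i
    simp only [Nat.testBit_and, Nat.testBit_xor, Nat.testBit_or]
    cases m.testBit i <;> cases n.testBit i <;> rfl
  have h3 := nat_add_xor_and (m ^^^ n) (m &&& n)
  omega

theorem nat_xor_mask {k r : Nat} (h : r < 2 ^ k) : (2 ^ k - 1) ^^^ r = 2 ^ k - 1 - r := by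
  have h1 : r &&& ((2 ^ k - 1) ^^^ r) = 0 := by
    apply Nat.eq_of_testBit_eq; intro i
    simp only [Nat.testBit_and, Nat.testBit_xor, Nat.zero_testBit, Nat.testBit_two_pow_sub_one]
    by_cases hi : i < k
    · simp only [hi, decide_true]
      cases r.testBit i <;> rfl
    · have hr : r.testBit i = false :=
        Nat.testBit_eq_false_of_lt
          (lt_of_lt_of_le h (Nat.pow_le_pow_right (by norm_num) (le_of_not_gt hi)))
      simp [hr]
  have h2 : r ^^^ ((2 ^ k - 1) ^^^ r) = 2 ^ k - 1 := by
    rw [Nat.xor_comm (2 ^ k - 1) r, Nat.xor_xor_cancel_left]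
  have h3 := nat_add_xor_and r ((2 ^ k - 1) ^^^ r)
  omega

theorem nat_dvd_and (m n k : Nat) (h : 2 ^ k ∣ n) : 2 ^ k ∣ m &&& n := by
  have hn : n &&& (2 ^ k - 1) = 0 := by
    rw [Nat.and_two_pow_sub_one_eq_mod]
    exact Nat.mod_eq_zero_of_dvd h
  have h0 : (m &&& n) &&& (2 ^ k - 1) = 0 := by
    rw [Nat.land_assoc, hn, Nat.and_zero]
  rw [Nat.and_two_pow_sub_one_eq_mod] at h0
  exact Nat.dvd_of_mod_eq_zero h0

theorem band_mask (x : Int) : PySem.Int.band x 4294967295 = x % 4294967296 := by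
  unfold PySem.Int.band
  have h32 : (2:Nat) ^ 32 - 1 = 4294967295 := by norm_num
  split_ifs with h1 h2 h2'
  · have := Nat.and_two_pow_sub_one_eq_mod x.toNat 32
    rw [h32] at this
    rw [show ((4294967295:Int).toNat) = 4294967295 from rfl]
    omega
  · exact absurd (by norm_num : (0:Int) ≤ 4294967295) h2
  · have hc := Nat.land_comm (4294967295:Nat) ((-x-1).toNat)
    have := Nat.and_two_pow_sub_one_eq_mod ((-x-1).toNat) 32
    rw [h32] at this
    rw [show ((4294967295:Int).toNat) = 4294967295 from rfl]
    omega
  · exact absurd (by norm_num : (0:Int) ≤ 4294967295) h2'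

theorem bxor_band_add (a b : Int) : PySem.Int.bxor a b + 2 * PySem.Int.band a b = a + b := by
  unfold PySem.Int.bxor PySem.Int.band
  split_ifs with h1 h2
  · have h := nat_add_xor_and a.toNat b.toNat
    set x := a.toNat ^^^ b.toNat with hx
    set y := a.toNat &&& b.toNat with hy
    omega
  · have h := nat_add_xor_and a.toNat ((-b-1).toNat)
    have hle : a.toNat &&& (-b-1).toNat ≤ a.toNat := Nat.and_le_left
    rw [Nat.cast_sub hle]
    omega
  · have hc := Nat.land_comm b.toNat ((-a-1).toNat)
    have h := nat_add_xor_and ((-a-1).toNat) b.toNat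
    have hle : b.toNat &&& (-a-1).toNat ≤ b.toNat := Nat.and_le_left
    rw [Nat.cast_sub hle]
    omega
  · have hor := nat_or_decomp ((-a-1).toNat) ((-b-1).toNat)
    have h := nat_add_xor_and ((-a-1).toNat) ((-b-1).toNat)
    set x := (-a-1).toNat ^^^ (-b-1).toNat with hx
    set y := (-a-1).toNat &&& (-b-1).toNat with hy
    set z := (-a-1).toNat ||| (-b-1).toNat with hz
    omega

theorem shift1_nonneg (c : Int) (hc : 0 ≤ c) : c <<< (1:Nat) = 2 * c := by
  obtain ⟨m, rfl⟩ := Int.eq_ofNat_of_zero_le hc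
  have h : ((m:Int)) <<< (1:Nat) = ((m <<< 1 : Nat) : Int) := rfl
  rw [h, Nat.shiftLeft_eq]
  push_cast
  ring

theorem int_not_eq (x : Int) : Int.not x = -x - 1 := by
  cases x with
  | ofNat n =>
    rw [show Int.not (Int.ofNat n) = Int.negSucc n from rfl, Int.negSucc_eq]
    simp [Int.ofNat_eq_natCast]; ring
  | negSucc n =>
    rw [show Int.not (Int.negSucc n) = Int.ofNat n from rfl, Int.negSucc_eq]
    simp [Int.ofNat_eq_natCast]

theorem bxor_mask_of_range (s : Int) (h0 : 0 ≤ s) (h1 : s < 4294967296) :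
    PySem.Int.bxor s 4294967295 = 4294967295 - s := by
  unfold PySem.Int.bxor
  rw [if_pos h0, if_pos (by norm_num : (0:Int) ≤ 4294967295)]
  have h32 : (2:Nat) ^ 32 - 1 = 4294967295 := by norm_num
  have hr : s.toNat < 2 ^ 32 := by omega
  have hx := nat_xor_mask hr
  rw [h32] at hx
  have hc := Nat.xor_comm s.toNat (4294967295:Nat)
  rw [show ((4294967295:Int).toNat) = 4294967295 from rfl]
  omega

theorem loop_zero_b (fuel : Nat) (a : Int) : integer_addition_loop fuel a 0 = a := by
  cases fuel <;> simp [integer_addition_loop]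

theorem loop_step (fuel : Nat) (a b : Int) (hb : b ≠ 0) :
    integer_addition_loop (fuel+1) a b = integer_addition_loop fuel
      (PySem.Int.band (PySem.Int.bxor a b) 4294967295)
      (PySem.Int.band ((PySem.Int.band (PySem.Int.band a b) 4294967295) <<< (1:Nat)) 4294967295) := by
  simp only [integer_addition_loop]
  rw [if_pos hb]

theorem loop_correct : ∀ (fuel k m n : Nat), m < 4294967296 → n < 4294967296 →
    2 ^ k ∣ n → 32 ≤ k + fuel →
    integer_addition_loop fuel ↑m ↑n = ↑((m + n) % 4294967296) := by
  intro fuel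
  induction fuel with
  | zero =>
    intro k m n hm hn hdvd hk
    have h2 : (2:Nat) ^ 32 ∣ n := dvd_trans (pow_dvd_pow 2 (by omega)) hdvd
    have hn0 : n = 0 := Nat.eq_zero_of_dvd_of_lt h2 (by norm_num; omega)
    subst hn0
    show (↑m : Int) = ↑((m + 0) % 4294967296)
    omega
  | succ fuel ih =>
    intro k m n hm hn hdvd hk
    by_cases hn0 : n = 0
    · subst hn0
      simp only [Nat.cast_zero]
      rw [loop_zero_b]
      omega
    · have hb : (↑n : Int) ≠ 0 := Int.natCast_ne_zero.mpr hn0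
      rw [loop_step fuel ↑m ↑n hb]
      have h32 : (2:Nat) ^ 32 - 1 = 4294967295 := by norm_num
      have hmaskc : (4294967295 : Int) = ((4294967295 : Nat) : Int) := rfl
      -- the new a
      have hxor : PySem.Int.bxor (↑m) (↑n) = ↑(m ^^^ n) := PySem.Int.bxor_natCast m n
      have hxm : (m ^^^ n) &&& 4294967295 = (m ^^^ n) % 4294967296 := by
        have := Nat.and_two_pow_sub_one_eq_mod (m ^^^ n) 32
        rw [h32] at this; norm_num at this ⊢; omega
      have ha' : PySem.Int.band (PySem.Int.bxor ↑m ↑n) 4294967295 =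
          ↑((m ^^^ n) % 4294967296) := by
        rw [hxor, hmaskc, PySem.Int.band_natCast, hxm]
      -- the carry
      have hand : PySem.Int.band (↑m) (↑n) = ↑(m &&& n) := PySem.Int.band_natCast m n
      have hcm : (m &&& n) &&& 4294967295 = m &&& n := by
        have h1 : m &&& n ≤ m := Nat.and_le_left
        have := Nat.and_two_pow_sub_one_eq_mod (m &&& n) 32
        rw [h32] at this; omega
      have hcarry : PySem.Int.band (PySem.Int.band ↑m ↑n) 4294967295 = ↑(m &&& n) := by
        rw [hand, hmaskc, PySem.Int.band_natCast, hcm]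
      -- the new b
      have hshift : (↑(m &&& n) : Int) <<< (1:Nat) = ↑(2 * (m &&& n)) := by
        rw [shift1_nonneg _ (by positivity)]; push_cast; ring
      have h2m : (2 * (m &&& n)) &&& 4294967295 = (2 * (m &&& n)) % 4294967296 := by
        have := Nat.and_two_pow_sub_one_eq_mod (2 * (m &&& n)) 32
        rw [h32] at this; omega
      have hb' : PySem.Int.band ((PySem.Int.band (PySem.Int.band ↑m ↑n) 4294967295) <<< (1:Nat)) 4294967295 =
          ↑((2 * (m &&& n)) % 4294967296) := by
        rw [hcarry, hshift, hmaskc, PySem.Int.band_natCast, h2m]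
      rw [ha', hb']
      -- divisibility bookkeeping for the recursive call
      have hklt : k < 32 := by
        by_contra hko
        have hko' : 32 ≤ k := Nat.le_of_not_lt hko
        have h1 : (2:Nat) ^ 32 ≤ 2 ^ k := Nat.pow_le_pow_right (by norm_num) hko'
        have h2 := Nat.le_of_dvd (Nat.pos_of_ne_zero hn0) hdvd
        norm_num at h1; omega
      have hdvd2 : 2 ^ (k+1) ∣ (2 * (m &&& n)) % 4294967296 := by
        have hd1 : 2 ^ (k+1) ∣ 2 * (m &&& n) := by
          rw [pow_succ']
          exact mul_dvd_mul_left 2 (nat_dvd_and m n k hdvd)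
        have hd2 : (2:Nat) ^ (k+1) ∣ 4294967296 := by
          have : (4294967296:Nat) = 2 ^ 32 := by norm_num
          rw [this]
          exact pow_dvd_pow 2 (by omega)
        exact (Nat.dvd_mod_iff hd2).mpr hd1
      have := ih (k+1) ((m ^^^ n) % 4294967296) ((2 * (m &&& n)) % 4294967296)
        (Nat.mod_lt _ (by norm_num)) (Nat.mod_lt _ (by norm_num)) hdvd2 (by omega)
      rw [this]
      have hsplit := nat_add_xor_and m n
      omega

-- ===== VERDICT (by name: the statement is the Claim_ definition above) =====
theorem conv_eq (x : Int) (hx1 : -2147483648 ≤ x) (hx2 : x ≤ 2147483648) :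
    (if x ≤ 2147483647 then x else Int.not (PySem.Int.bxor x 4294967295)) =
    (if x % 4294967296 ≤ 2147483647 then x % 4294967296
     else Int.not (PySem.Int.bxor (x % 4294967296) 4294967295)) := by
  by_cases h0 : 0 ≤ x
  · rw [Int.emod_eq_of_lt h0 (by omega)]
  · have h0' : x < 0 := by omega
    have hmod : x % 4294967296 = x + 4294967296 := by omega
    rw [if_pos (by omega : x ≤ 2147483647), hmod, if_neg (by omega)]
    rw [bxor_mask_of_range _ (by omega) (by omega), int_not_eq]
    omega

theorem integer_addition_spec : Claim_equal_integer_addition := by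
  unfold Claim_equal_integer_addition
  intro a b hdom
  unfold Spec_integer_addition
  have hd : -2147483648 ≤ a ∧ a ≤ 2147483648 ∧ -2147483648 ≤ b ∧ b ≤ 2147483648 := by
    unfold Dom_integer_addition pvDomInt at hdom
    simp at hdom
    omega
  by_cases hb : b = 0
  · subst hb
    simp only [integer_addition, integer_addition_alt]
    rw [loop_zero_b, add_zero, band_mask]
    exact conv_eq a hd.1 hd.2.1
  · have hloop : integer_addition_loop 64 a b = (a + b) % 4294967296 := by
      rw [show (64:Nat) = 63+1 from rfl, loop_step 63 a b hb]
      have hc : PySem.Int.band (PySem.Int.band a b) 4294967295 = (PySem.Int.band a b) % 4294967296 :=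
        band_mask _
      have hcnn : 0 ≤ (PySem.Int.band a b) % 4294967296 := Int.emod_nonneg _ (by norm_num)
      have ha' : PySem.Int.band (PySem.Int.bxor a b) 4294967295 = (PySem.Int.bxor a b) % 4294967296 :=
        band_mask _
      have hb' : PySem.Int.band ((PySem.Int.band (PySem.Int.band a b) 4294967295) <<< (1:Nat)) 4294967295 =
          (2 * ((PySem.Int.band a b) % 4294967296)) % 4294967296 := by
        rw [hc, shift1_nonneg _ hcnn, band_mask]
      rw [ha', hb']
      set A1 := (PySem.Int.bxor a b) % 4294967296 with hA1
      set B1 := (2 * ((PySem.Int.band a b) % 4294967296)) % 4294967296 with hB1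
      have hA1n : 0 ≤ A1 := Int.emod_nonneg _ (by norm_num)
      have hA1l : A1 < 4294967296 := Int.emod_lt_of_pos _ (by norm_num)
      have hB1n : 0 ≤ B1 := Int.emod_nonneg _ (by norm_num)
      have hB1l : B1 < 4294967296 := Int.emod_lt_of_pos _ (by norm_num)
      have hAc : A1 = ↑A1.toNat := (Int.toNat_of_nonneg hA1n).symm
      have hBc : B1 = ↑B1.toNat := (Int.toNat_of_nonneg hB1n).symm
      rw [hAc, hBc]
      rw [loop_correct 63 0 A1.toNat B1.toNat (by omega) (by omega)
        (by simp) (by omega)]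
      have hsum := bxor_band_add a b
      omega
    simp only [integer_addition, integer_addition_alt]
    rw [hloop, band_mask]
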